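-- pv_equiv track=rewrite | github.com/981377660LMT/algorithm-study | 12_贪心算法/经典题/1432. 改变一个整数能得到的最大差值.py | maxDiff2
-- ===== SOURCE A (Python) =====
-- def maxDiff2(num: int) -> int:
--     s, res = str(num), []
--     for i in range(0, 10):
--         for j in range(0, 10):
--             tmp = s.replace(str(i), str(j))
--             if tmp[0] == '0' or int(tmp) == 0:
--                 continue
--             res.append(int(tmp))
--     return max(res) - min(res)
-- ===== SOURCE B (Python) =====
-- def maxDiff2(num: int) -> int:
--     if num == 0:
--         return 8
--     n = abs(num)
--     rev = []
--     while n != 0: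
--         rev.append(n % 10)
--         n //= 10
--     ds = rev[::-1]  # decimal digits of abs(num), most significant first
--
--     def sub(src, dst):
--         v = 0
--         for d in ds:
--             v = 10 * v + (dst if d == src else d)
--         return v
--
--     src9 = next((d for d in ds if d != 9), 9)
--     hi = sub(src9, 9)  # largest reachable magnitude
--     head = ds[0]
--     if num > 0:
--         if head != 1:
--             lo = sub(head, 1)
--         else:
--             src0 = next((d for d in ds[1:] if d != 0 and d != 1), 0)
--             lo = sub(src0, 0)
--         return hi - lo
--     else:
--         # negative: magnitude may gain leading zeros, only total zero is forbidden
--         if all(d == head or d == 0 for d in ds):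
--             small = sub(head, 1)
--         else:
--             small = sub(head, 0)
--         return (-small) - (-hi)
-- ===== Notes on version B (the rewrite author's own statement) =====
-- stated objective: alternative
-- what changed: A builds str(num), enumerates every digit-replacement pair (i,j), parses each surviving replaced string back to int and takes max-min over all of them; B instead decomposes |num| into its digit list arithmetically and picks the maximising and minimising replacement directly by a greedy rule (first non-nine digit raised to nine for the max; leading digit lowered to one, or first inner digit outside {zero,one} lowered to zero, with sign-aware variants for negatives, for the min), evaluating only those two candidates and no strings at all.
import Mathlib
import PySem

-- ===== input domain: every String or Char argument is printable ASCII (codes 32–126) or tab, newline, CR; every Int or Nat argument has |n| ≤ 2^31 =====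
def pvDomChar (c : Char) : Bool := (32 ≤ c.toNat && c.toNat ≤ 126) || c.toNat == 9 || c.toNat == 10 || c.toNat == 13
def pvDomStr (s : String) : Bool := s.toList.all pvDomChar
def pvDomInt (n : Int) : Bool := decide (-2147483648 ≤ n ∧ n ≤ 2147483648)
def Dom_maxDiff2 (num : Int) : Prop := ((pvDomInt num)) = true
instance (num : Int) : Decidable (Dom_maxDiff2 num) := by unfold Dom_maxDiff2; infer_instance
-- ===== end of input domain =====

-- B replaces A's enumeration of all 100 digit-replacement strings by a direct greedy
-- digit selection computed arithmetically on the digit list (no strings); proved equal.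

-- ===== PORT A =====

-- Hand port of Python `int(...)`, exact for every string this program parses: an
-- optional '-' followed by one or more decimal digits (`str(num)` has this shape and
-- replacing one digit character by a digit character preserves it; no whitespace,
-- sign variants or underscores can occur).  On these strings Python's int() is
-- exactly sign times the decimal value of the digits.
def pvDigitsVal (cs : List Char) : Int :=
  cs.foldl (fun a c => 10 * a + ((c.toNat : Int) - 48)) 0

def pvStrInt (s : String) : Int :=
  match s.toList with
  | '-' :: ds => - pvDigitsVal ds
  | ds => pvDigitsVal ds

-- the two nested `for` loops building `res`
def pvLoop (s : String) : List Int :=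
  (PySem.List.pyRange 0 10 1).foldl (fun res i =>
    (PySem.List.pyRange 0 10 1).foldl (fun res j =>
      let tmp := PySem.Str.replace s (PySem.Int.toStr i) (PySem.Int.toStr j)
      if PySem.Str.pyGet? tmp 0 = some '0' ∨ pvStrInt tmp = 0 then res
      else res ++ [pvStrInt tmp]) res) []

def maxDiff2 (num : Int) : Int :=
  let res := pvLoop (PySem.Int.toStr num)
  -- max(res) - min(res); the `getD 0` defaults are unreachable: res is never empty
  -- (on the empty list Python's max/min would raise, and max?/min? return none)
  (PySem.List.max? res (fun x => x)).getD 0 - (PySem.List.min? res (fun x => x)).getD 0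

-- ===== PORT B =====

-- the `while n != 0: rev.append(n % 10); n //= 10` loop of Source B; n = abs(num) ≥ 0
-- always, so the `n ≤ 0` guard (needed for termination in Lean) agrees with `n != 0`
def pvRevDigits (n : Int) : List Int :=
  if _h : n ≤ 0 then []
  else PySem.Int.mod n 10 :: pvRevDigits (PySem.Int.floordiv n 10)
termination_by n.toNat
decreasing_by
  rw [PySem.Int.floordiv_eq_ediv_of_pos (by norm_num)]
  omega

-- the inner `sub(src, dst)` loop of Source B
def pvSub (ds : List Int) (src dst : Int) : Int :=
  ds.foldl (fun v d => 10 * v + (if d = src then dst else d)) 0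

def maxDiff2_alt (num : Int) : Int :=
  if num = 0 then 8
  else
    let ds := (pvRevDigits (if num < 0 then -num else num)).reverse
    let src9 := (ds.find? (fun d => d != 9)).getD 9
    let hi := pvSub ds src9 9
    let head := (PySem.List.pyGet? ds 0).getD 0   -- ds[0]; never out of range here (num ≠ 0)
    if 0 < num then
      let lo :=
        if head ≠ 1 then pvSub ds head 1
        else pvSub ds (((PySem.List.slice ds (some 1) none).find? (fun d => d != 0 && d != 1)).getD 0) 0
      hi - lo
    else
      let small :=
        if ds.all (fun d => d == head || d == 0) then pvSub ds head 1 else pvSub ds head 0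
      (-small) - (-hi)

-- ===== PRECONDITION & SPEC =====
def Spec_maxDiff2 (num : Int) (out : Int) : Prop := out = maxDiff2_alt num
instance (num : Int) (out : Int) : Decidable (Spec_maxDiff2 num out) := by unfold Spec_maxDiff2; infer_instance

-- ===== CLAIM (what is proved, stated in full; the proofs are below) =====
def Claim_equal_maxDiff2 : Prop := ∀ (num : Int), Dom_maxDiff2 num → Spec_maxDiff2 num (maxDiff2 num)

-- ===== LEMMAS AND PROOFS =====
def pvDig (ds : List Int) : Prop := ∀ d ∈ ds, 0 ≤ d ∧ d < 10
def pvV (ds : List Int) : Int := ds.foldl (fun a d => 10 * a + d) 0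
def pvSubst (i j : Int) (ds : List Int) : List Int := ds.map (fun d => if d = i then j else d)

theorem pvV_foldl_acc (t : List Int) (a : Int) :
    List.foldl (fun a d => 10 * a + d) a t = a * 10 ^ t.length + pvV t := by
  induction t generalizing a with
  | nil => simp [pvV]
  | cons d t ih =>
    simp only [List.foldl_cons, List.length_cons, pvV]
    rw [ih (10 * a + d), ih (10 * 0 + d)]
    ring

theorem pvV_cons (d : Int) (t : List Int) : pvV (d :: t) = d * 10 ^ t.length + pvV t := by
  show List.foldl _ (10 * 0 + d) t = _
  rw [pvV_foldl_acc t (10 * 0 + d)]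
  ring

theorem pvV_nonneg {ds : List Int} (h : pvDig ds) : 0 ≤ pvV ds := by
  induction ds with
  | nil => simp [pvV]
  | cons d t ih =>
    rw [pvV_cons]
    have hd := h d (by simp)
    have ht := ih (fun x hx => h x (by simp [hx]))
    have hp : (0:Int) < 10 ^ t.length := by positivity
    nlinarith

theorem pvV_lt {ds : List Int} (h : pvDig ds) : pvV ds < 10 ^ ds.length := by
  induction ds with
  | nil => simp [pvV]
  | cons d t ih =>
    rw [pvV_cons]
    have hd := h d (by simp)
    have ht := ih (fun x hx => h x (by simp [hx]))
    have hp : (0:Int) < 10 ^ t.length := by positivity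
    calc d * 10 ^ t.length + pvV t < d * 10 ^ t.length + 10 ^ t.length := by omega
    _ = (d + 1) * 10 ^ t.length := by ring
    _ ≤ 10 * 10 ^ t.length := by nlinarith [hd.2]
    _ = 10 ^ (d :: t).length := by rw [List.length_cons]; ring

theorem pvV_map_mono {ds : List Int} (f g : Int → Int) (h : ∀ d ∈ ds, f d ≤ g d) :
    pvV (ds.map f) ≤ pvV (ds.map g) := by
  induction ds with
  | nil => simp
  | cons d t ih =>
    simp only [List.map_cons]
    rw [pvV_cons, pvV_cons]
    have h1 := h d (by simp)
    have h2 := ih (fun x hx => h x (by simp [hx]))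
    have hp : (0:Int) ≤ 10 ^ (t.map f).length := by positivity
    simp only [List.length_map] at *
    nlinarith

theorem pvV_cons_lt {t u : List Int} {a b : Int} (ht : pvDig t) (hu : pvDig u)
    (hlen : t.length = u.length) (hab : a < b) : pvV (a :: t) < pvV (b :: u) := by
  rw [pvV_cons, pvV_cons, hlen]
  have h1 := pvV_lt ht
  have h2 := pvV_nonneg hu
  rw [hlen] at h1
  nlinarith [pow_pos (show (0:Int) < 10 by norm_num) u.length]

theorem pvDig_subst {ds : List Int} (h : pvDig ds) {i j : Int} (hj0 : 0 ≤ j) (hj9 : j < 10) :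
    pvDig (pvSubst i j ds) := by
  intro d hd
  simp only [pvSubst, List.mem_map] at hd
  obtain ⟨e, he, rfl⟩ := hd
  split
  · exact ⟨hj0, hj9⟩
  · exact h e he

theorem pvSubst_self (i : Int) (ds : List Int) : pvSubst i i ds = ds := by
  unfold pvSubst
  conv_rhs => rw [← List.map_id ds]
  exact List.map_congr_left (fun d _ => by split <;> simp_all)

theorem pvV_pos_of_mem {ds : List Int} (h : pvDig ds) {e : Int} (he : e ∈ ds) (he1 : 1 ≤ e) :
    0 < pvV ds := by
  induction ds with
  | nil => simp at he
  | cons d t ih =>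
    rw [pvV_cons]
    have hd := h d (by simp)
    have ht : pvDig t := fun x hx => h x (by simp [hx])
    have hnn := pvV_nonneg ht
    have hp : (0:Int) < 10 ^ t.length := by positivity
    rcases List.mem_cons.mp he with rfl | hmem
    · nlinarith
    · have := ih ht hmem
      nlinarith
  
theorem pvV_eq_zero_of_all {ds : List Int} (h : ∀ d ∈ ds, d = 0) : pvV ds = 0 := by
  induction ds with
  | nil => simp [pvV]
  | cons d t ih =>
    rw [pvV_cons, h d (by simp), ih (fun x hx => h x (by simp [hx]))]
    ring

theorem pvV_cons_le {t u : List Int} (a : Int) (hlen : t.length = u.length)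
    (h : pvV t ≤ pvV u) : pvV (a :: t) ≤ pvV (a :: u) := by
  rw [pvV_cons, pvV_cons, hlen]; omega

theorem pvLen_subst (i j : Int) (ds : List Int) : (pvSubst i j ds).length = ds.length := by
  simp [pvSubst]

theorem pvSubst_cons (i j d : Int) (t : List Int) :
    pvSubst i j (d :: t) = (if d = i then j else d) :: pvSubst i j t := rfl

theorem pvMaxLem {ds : List Int} (h : pvDig ds) (i j : Int) (hj0 : 0 ≤ j) (hj9 : j < 10) :
    pvV (pvSubst i j ds) ≤ pvV (pvSubst ((ds.find? (fun d => d != 9)).getD 9) 9 ds) := by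
  induction ds with
  | nil => simp [pvSubst, pvV]
  | cons d t ih =>
    have hd := h d (by simp)
    have ht : pvDig t := fun x hx => h x (by simp [hx])
    have hts : pvDig (pvSubst i j t) := pvDig_subst ht hj0 hj9
    by_cases hd9 : d = 9
    · subst hd9
      have hfind : ((9 :: t).find? (fun d => d != 9)) = t.find? (fun d => d != 9) :=
        List.find?_cons_of_neg (by simp)
      rw [hfind, pvSubst_cons, pvSubst_cons]
      have h9 : (if (9:Int) = (t.find? (fun d => d != 9)).getD 9 then (9:Int) else 9) = 9 := by
        split <;> rfl
      rw [h9]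
      set hc := if (9:Int) = i then j else 9 with hhc
      have hcle : hc ≤ 9 := by rw [hhc]; split <;> omega
      rcases lt_or_eq_of_le hcle with hlt | heq
      · exact le_of_lt (pvV_cons_lt hts (pvDig_subst ht (by norm_num) (by norm_num))
          (by simp [pvLen_subst]) hlt)
      · rw [heq]
        exact pvV_cons_le 9 (by simp [pvLen_subst]) (ih ht)
    · have hfind : ((d :: t).find? (fun d => d != 9)) = some d :=
        List.find?_cons_of_pos (by simp [hd9])
      rw [hfind]
      simp only [Option.getD_some]
      rw [pvSubst_cons, pvSubst_cons, if_pos rfl]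
      by_cases hdi : d = i
      · subst hdi
        by_cases hj : j = 9
        · subst hj; rw [if_pos rfl]
        · have hlt : (if d = d then j else d) < 9 := by rw [if_pos rfl]; omega
          exact le_of_lt (pvV_cons_lt hts (pvDig_subst ht (by norm_num) (by norm_num))
            (by simp [pvLen_subst]) hlt)
      · have hlt : (if d = i then j else d) < 9 := by rw [if_neg hdi]; omega
        exact le_of_lt (pvV_cons_lt hts (pvDig_subst ht (by norm_num) (by norm_num))
          (by simp [pvLen_subst]) hlt)

theorem pvSrc0_ne_one (t : List Int) : ((t.find? (fun d => d != 0 && d != 1)).getD 0) ≠ 1 := by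
  rcases hf : t.find? (fun d => d != 0 && d != 1) with _ | e
  · simp
  · have := List.find?_some hf
    simp at this ⊢
    omega

theorem pvMin2Lem {t : List Int} (h : pvDig t) :
    ∀ (i j : Int), i ≠ 1 → 0 ≤ j → j < 10 →
    pvV (pvSubst ((t.find? (fun d => d != 0 && d != 1)).getD 0) 0 t) ≤ pvV (pvSubst i j t) := by
  induction t with
  | nil => intro i j _ _ _; simp [pvSubst, pvV]
  | cons d u ih =>
    intro i j hi hj0 hj9
    have hd := h d (by simp)
    have hu : pvDig u := fun x hx => h x (by simp [hx])
    have hus : pvDig (pvSubst i j u) := pvDig_subst hu hj0 hj9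
    by_cases hp : d ≠ 0 ∧ d ≠ 1
    · have hfind : ((d :: u).find? (fun d => d != 0 && d != 1)) = some d :=
        List.find?_cons_of_pos (by simp [hp.1, hp.2])
      rw [hfind]
      simp only [Option.getD_some]
      rw [pvSubst_cons, pvSubst_cons, if_pos rfl]
      by_cases hdi : d = i
      · subst hdi
        by_cases hj : j = 0
        · subst hj; rw [if_pos rfl]
        · have hlt : (0:Int) < (if d = d then j else d) := by rw [if_pos rfl]; omega
          exact le_of_lt (pvV_cons_lt (pvDig_subst hu (by norm_num) (by norm_num)) hus
            (by simp [pvLen_subst]) hlt)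
      · have hlt : (0:Int) < (if d = i then j else d) := by rw [if_neg hdi]; omega
        exact le_of_lt (pvV_cons_lt (pvDig_subst hu (by norm_num) (by norm_num)) hus
          (by simp [pvLen_subst]) hlt)
    · have hd01 : d = 0 ∨ d = 1 := by omega
      rcases hd01 with rfl | rfl
      · have hfind : (((0:Int) :: u).find? (fun d => d != 0 && d != 1)) = u.find? (fun d => d != 0 && d != 1) :=
          List.find?_cons_of_neg (by simp)
        rw [hfind, pvSubst_cons, pvSubst_cons]
        have h0 : (if (0:Int) = (u.find? (fun d => d != 0 && d != 1)).getD 0 then (0:Int) else 0) = 0 := by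
          split <;> rfl
        rw [h0]
        by_cases hi0 : (0:Int) = i
        · by_cases hj' : j = 0
          · subst hj'
            rw [if_pos hi0]
            apply pvV_cons_le 0 (by simp [pvLen_subst])
            have := ih hu i 0 hi (le_refl 0) (by norm_num)
            calc pvV (pvSubst ((u.find? (fun d => d != 0 && d != 1)).getD 0) 0 u)
                ≤ pvV (pvSubst i 0 u) := this
              _ = pvV u := by rw [← hi0, pvSubst_self]
              _ = pvV (pvSubst i 0 u) := by rw [← hi0, pvSubst_self]
          · rw [if_pos hi0]
            have hlt : (0:Int) < j := by omega
            exact le_of_lt (pvV_cons_lt (pvDig_subst hu (by norm_num) (by norm_num)) hus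
              (by simp [pvLen_subst]) hlt)
        · rw [if_neg hi0]
          exact pvV_cons_le 0 (by simp [pvLen_subst]) (ih hu i j hi hj0 hj9)
      · have hfind : (((1:Int) :: u).find? (fun d => d != 0 && d != 1)) = u.find? (fun d => d != 0 && d != 1) :=
          List.find?_cons_of_neg (by simp)
        rw [hfind, pvSubst_cons, pvSubst_cons]
        have h1 : (if (1:Int) = (u.find? (fun d => d != 0 && d != 1)).getD 0 then (0:Int) else 1) = 1 := by
          rw [if_neg (fun hh => pvSrc0_ne_one u hh.symm)]
        have h2 : (if (1:Int) = i then j else 1) = 1 := by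
          rw [if_neg (fun hh => hi hh.symm)]
        rw [h1, h2]
        exact pvV_cons_le 1 (by simp [pvLen_subst]) (ih hu i j hi hj0 hj9)
-- toDigitsCore characterization
theorem pvToDigitsCore (fuel : Nat) : ∀ (n : Nat) (acc : List Char), 0 < n → n < 10 ^ fuel →
    Nat.toDigitsCore 10 fuel n acc = ((Nat.digits 10 n).map Nat.digitChar).reverse ++ acc := by
  induction fuel with
  | zero => intro n acc h1 h2; simp at h2; omega
  | succ fuel ih =>
    intro n acc h1 h2
    rw [Nat.toDigitsCore]
    by_cases hn : n / 10 = 0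
    · rw [if_pos hn]
      rw [Nat.digits_def' (by norm_num) h1, hn]
      simp
    · rw [if_neg hn]
      rw [ih (n / 10) _ (Nat.pos_of_ne_zero hn) (by
        rw [Nat.div_lt_iff_lt_mul (show 0 < 10 by norm_num)]
        calc n < 10 ^ (fuel + 1) := h2
        _ = 10 ^ fuel * 10 := by ring)]
      rw [Nat.digits_def' (by norm_num) h1]
      simp

theorem pvToDigits (n : Nat) (h : 0 < n) :
    Nat.toDigits 10 n = ((Nat.digits 10 n).map Nat.digitChar).reverse := by
  rw [Nat.toDigits, pvToDigitsCore (n+1) n [] h]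
  · simp
  · calc n < 10 ^ n := Nat.lt_pow_self (by norm_num)
    _ ≤ 10 ^ (n + 1) := Nat.pow_le_pow_right (by norm_num) (by omega)

-- pvRevDigits (B's while loop) equals Nat.digits
theorem pvRevDigits_eq (n : Nat) :
    pvRevDigits (n : Int) = (Nat.digits 10 n).map (fun (d : Nat) => (d : Int)) := by
  induction n using Nat.strong_induction_on with
  | _ n ih =>
    rw [pvRevDigits]
    by_cases h : (n : Int) ≤ 0
    · have : n = 0 := by omega
      subst this
      simp
    · rw [dif_neg h]
      have hn : 0 < n := by omega
      rw [PySem.Int.mod_eq_emod_of_pos (by norm_num), PySem.Int.floordiv_eq_ediv_of_pos (by norm_num)]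
      have hmod : (n : Int) % 10 = ((n % 10 : Nat) : Int) := by push_cast; ring
      have hdiv : (n : Int) / 10 = ((n / 10 : Nat) : Int) := by
        omega
      rw [hmod, hdiv, ih (n / 10) (by omega)]
      rw [Nat.digits_def' (by norm_num) hn]
      simp

-- digitChar facts
theorem pvDigitChar_toNat {d : Nat} (h : d < 10) : ((Nat.digitChar d).toNat : Int) - 48 = d := by
  interval_cases d <;> decide

theorem pvDigitChar_ne_dash {d : Nat} (h : d < 10) : Nat.digitChar d ≠ '-' := by
  interval_cases d <;> decide

theorem pvDigitChar_eq_zero_iff {d : Nat} (h : d < 10) : Nat.digitChar d = '0' ↔ d = 0 := by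
  interval_cases d <;> decide

-- toChars of small i
theorem pvToChars_digit (i : Int) (h0 : 0 ≤ i) (h9 : i < 10) :
    PySem.Int.toChars i = [Nat.digitChar i.toNat] := by
  interval_cases i <;> decide

-- single-char replace is map
theorem pvReplaceGo (a b : Char) : ∀ (l acc : List Char) (fuel : Nat), l.length ≤ fuel →
    PySem.Chars.replace.go [a] [b] fuel l acc =
      acc.reverse ++ l.map (fun c => if c = a then b else c) := by
  intro l
  induction l with
  | nil => intro acc fuel _; cases fuel <;> simp [PySem.Chars.replace.go]
  | cons c t ih =>
    intro acc fuel hf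
    cases fuel with
    | zero => simp at hf
    | succ fuel =>
      rw [PySem.Chars.replace.go]
      simp only [List.length_cons] at hf
      by_cases hca : c = a
      · subst hca
        have hpre : [c].isPrefixOf (c :: t) = true := by simp [List.isPrefixOf]
        rw [if_pos hpre]
        simp only [List.length_cons, List.length_nil, List.drop_succ_cons, List.drop_zero]
        rw [ih _ fuel (by omega)]
        simp [if_pos rfl]
      · have hpre : ¬([a].isPrefixOf (c :: t) = true) := by
          simp [List.isPrefixOf]
          exact fun hh => (hca hh.symm).elim
        rw [if_neg hpre]
        rw [ih _ fuel (by omega)]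
        simp [hca]

theorem pvReplace_single (a b : Char) (l : List Char) :
    PySem.Chars.replace l [a] [b] = l.map (fun c => if c = a then b else c) := by
  rw [PySem.Chars.replace]
  rw [if_neg (by simp)]
  simpa using pvReplaceGo a b l [] l.length (le_refl _)
-- ===== lem4: bridging to the ports =====

def pvDS (num : Int) : List Int := (Nat.digits 10 num.natAbs).reverse.map (fun (d : Nat) => (d : Int))

theorem pvDS_dig (num : Int) : pvDig (pvDS num) := by
  intro d hd
  simp only [pvDS, List.mem_map, List.mem_reverse] at hd
  obtain ⟨e, he, rfl⟩ := hd
  have := Nat.digits_lt_base (by norm_num) he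
  omega

theorem pvDS_cons (num : Int) (h0 : num ≠ 0) :
    ∃ hh tt, pvDS num = hh :: tt ∧ 1 ≤ hh ∧ hh < 10 := by
  have hne : num.natAbs ≠ 0 := by omega
  have hdne : Nat.digits 10 num.natAbs ≠ [] := Nat.digits_ne_nil_iff_ne_zero.mpr hne
  have hrev : (Nat.digits 10 num.natAbs).reverse ≠ [] := by simpa using hdne
  obtain ⟨hh, tt, heq⟩ := List.exists_cons_of_ne_nil hrev
  have hlast : (Nat.digits 10 num.natAbs).getLast hdne ≠ 0 := Nat.getLast_digit_ne_zero 10 hne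
  have hhead : hh = (Nat.digits 10 num.natAbs).getLast hdne := by
    have h1 : (Nat.digits 10 num.natAbs).getLast? = some hh := by
      rw [List.getLast?_eq_head?_reverse, heq]
      rfl
    rw [List.getLast?_eq_getLast hdne] at h1
    exact (Option.some_injective _ h1).symm
  have hlt : hh < 10 := by
    have : hh ∈ (Nat.digits 10 num.natAbs).reverse := by rw [heq]; simp
    exact Nat.digits_lt_base (by norm_num) (List.mem_reverse.mp this)
  refine ⟨(hh : Int), tt.map (fun (d : Nat) => (d : Int)), ?_, ?_, ?_⟩
  · rw [pvDS, heq]; simp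
  · have : hh ≠ 0 := by rw [hhead]; exact hlast
    omega
  · omega

theorem pvDigitChar_inj {a b : Nat} (ha : a < 10) (hb : b < 10) :
    Nat.digitChar a = Nat.digitChar b ↔ a = b := by
  interval_cases a <;> interval_cases b <;> decide

theorem pvDigitsVal_map_acc (ds : List Int) (h : pvDig ds) : ∀ a : Int,
    List.foldl (fun a c => 10 * a + ((c.toNat : Int) - 48)) a (ds.map (fun d => Nat.digitChar d.toNat))
      = List.foldl (fun a d => 10 * a + d) a ds := by
  induction ds with
  | nil => intro a; simp
  | cons d t ih =>
    intro a
    have hd := h d (by simp)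
    have hchar : ((Nat.digitChar d.toNat).toNat : Int) - 48 = d := by
      have h10 : d.toNat < 10 := by omega
      rw [pvDigitChar_toNat h10]
      omega
    simp only [List.map_cons, List.foldl_cons, hchar]
    exact ih (fun x hx => h x (by simp [hx])) _

theorem pvDigitsVal_map (ds : List Int) (h : pvDig ds) :
    pvDigitsVal (ds.map (fun d => Nat.digitChar d.toNat)) = pvV ds :=
  pvDigitsVal_map_acc ds h 0

theorem pvToChars_pos (num : Int) (h : 0 < num) :
    PySem.Int.toChars num = (pvDS num).map (fun d => Nat.digitChar d.toNat) := by
  rw [PySem.Int.toChars, if_neg (by omega)]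
  have hnt : num.toNat = num.natAbs := by omega
  rw [hnt, pvToDigits num.natAbs (by omega)]
  rw [pvDS, List.map_map, List.map_reverse]
  congr 1

theorem pvToChars_neg (num : Int) (h : num < 0) :
    PySem.Int.toChars num = '-' :: (pvDS num).map (fun d => Nat.digitChar d.toNat) := by
  rw [PySem.Int.toChars, if_pos h]
  rw [pvToDigits num.natAbs (by omega)]
  rw [pvDS, List.map_map, List.map_reverse]
  congr 2

-- the replacement string, positive case
theorem pvTmp_pos (num i j : Int) (hnum : 0 < num) (hi0 : 0 ≤ i) (hi9 : i < 10)
    (hj0 : 0 ≤ j) (hj9 : j < 10) :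
    (PySem.Str.replace (PySem.Int.toStr num) (PySem.Int.toStr i) (PySem.Int.toStr j)).toList
      = (pvSubst i j (pvDS num)).map (fun d => Nat.digitChar d.toNat) := by
  rw [PySem.Str.toList_replace, PySem.Int.toList_toStr, PySem.Int.toList_toStr,
    PySem.Int.toList_toStr, pvToChars_digit i hi0 hi9, pvToChars_digit j hj0 hj9,
    pvToChars_pos num hnum, pvReplace_single, List.map_map]
  unfold pvSubst
  rw [List.map_map]
  apply List.map_congr_left
  intro d hd
  have hdig := pvDS_dig num d hd
  simp only [Function.comp_apply]
  by_cases hdi : d = i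
  · rw [if_pos (by rw [pvDigitChar_inj (by omega) (by omega)]; omega), if_pos hdi]
  · rw [if_neg (by rw [pvDigitChar_inj (by omega) (by omega)]; omega), if_neg hdi]

theorem pvTmp_neg (num i j : Int) (hnum : num < 0) (hi0 : 0 ≤ i) (hi9 : i < 10)
    (hj0 : 0 ≤ j) (hj9 : j < 10) :
    (PySem.Str.replace (PySem.Int.toStr num) (PySem.Int.toStr i) (PySem.Int.toStr j)).toList
      = '-' :: (pvSubst i j (pvDS num)).map (fun d => Nat.digitChar d.toNat) := by
  rw [PySem.Str.toList_replace, PySem.Int.toList_toStr, PySem.Int.toList_toStr,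
    PySem.Int.toList_toStr, pvToChars_digit i hi0 hi9, pvToChars_digit j hj0 hj9,
    pvToChars_neg num hnum, pvReplace_single]
  rw [List.map_cons, if_neg (fun hh => pvDigitChar_ne_dash (show i.toNat < 10 by omega) hh.symm)]
  congr 1
  unfold pvSubst
  rw [List.map_map, List.map_map]
  apply List.map_congr_left
  intro d hd
  have hdig := pvDS_dig num d hd
  simp only [Function.comp_apply]
  by_cases hdi : d = i
  · rw [if_pos (by rw [pvDigitChar_inj (by omega) (by omega)]; omega), if_pos hdi]
  · rw [if_neg (by rw [pvDigitChar_inj (by omega) (by omega)]; omega), if_neg hdi]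

-- head char of a string from its toList
theorem pvHead_get (tmp : String) (c : Char) (l : List Char) (h : tmp.toList = c :: l) :
    PySem.Str.pyGet? tmp 0 = some c := by
  rw [PySem.Str.pyGet?_eq, PySem.Chars.pyGet?_eq_listPyGet?, h]
  exact PySem.List.pyGet?_zero_cons c l

-- max?/min? pinning
theorem pvMaxEq (xs : List Int) (m : Int) (hm : m ∈ xs) (hub : ∀ y ∈ xs, y ≤ m) :
    PySem.List.max? xs (fun x => x) = some m := by
  rcases hx : PySem.List.max? xs (fun x => x) with _ | m'
  · rw [PySem.List.max?_eq_none_iff] at hx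
    subst hx
    simp at hm
  · have h1 := PySem.List.max?_isMax hx m hm
    have h2 := hub m' (PySem.List.max?_mem hx)
    have : m' = m := le_antisymm h2 h1
    rw [this]

theorem pvMinEq (xs : List Int) (m : Int) (hm : m ∈ xs) (hlb : ∀ y ∈ xs, m ≤ y) :
    PySem.List.min? xs (fun x => x) = some m := by
  rcases hx : PySem.List.min? xs (fun x => x) with _ | m'
  · rw [PySem.List.min?_eq_none_iff] at hx
    subst hx
    simp at hm
  · have h1 := PySem.List.min?_isMin hx m hm
    have h2 := hlb m' (PySem.List.min?_mem hx)
    have : m' = m := le_antisymm h1 h2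
    rw [this]
-- ===== lem5: greedy min selectors =====

/-- positive case: B's chosen minimum is ≤ every admissible candidate -/
theorem pvMinPosLem {h : Int} {t : List Int} (hdig : pvDig (h :: t)) (hh1 : 1 ≤ h)
    (i j : Int) (hj0 : 0 ≤ j) (hj9 : j < 10)
    (hhead : (if h = i then j else h) ≠ 0) :
    pvV (if h ≠ 1 then pvSubst h 1 (h :: t)
         else pvSubst ((t.find? (fun d => d != 0 && d != 1)).getD 0) 0 (h :: t))
      ≤ pvV (pvSubst i j (h :: t)) := by
  have ht : pvDig t := fun x hx => hdig x (by simp [hx])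
  have hts : pvDig (pvSubst i j t) := pvDig_subst ht hj0 hj9
  have hh9 : h < 10 := (hdig h (by simp)).2
  rw [pvSubst_cons i j]
  set hc := if h = i then j else h with hhc
  have hc1 : 1 ≤ hc := by rw [hhc]; rw [hhc] at hhead; split at hhead <;> split <;> omega
  by_cases hone : h = 1
  · subst hone
    rw [if_neg (by simp)]
    rw [pvSubst_cons]
    have hsrc : ((t.find? (fun d => d != 0 && d != 1)).getD 0) ≠ 1 := pvSrc0_ne_one t
    rw [if_neg (fun hh => hsrc hh.symm)]
    rcases lt_or_eq_of_le hc1 with hlt | heq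
    · exact le_of_lt (pvV_cons_lt (pvDig_subst ht (by norm_num) (by norm_num)) hts
        (by simp [pvLen_subst]) hlt)
    · rw [← heq]
      apply pvV_cons_le 1 (by simp [pvLen_subst])
      by_cases hi1 : (1:Int) = i
      · have hj1 : j = 1 := by rw [hhc] at heq; rw [if_pos hi1] at heq; omega
        subst hj1
        have := pvMin2Lem ht 0 0 (by norm_num) (le_refl 0) (by norm_num)
        rw [pvSubst_self] at this
        calc pvV (pvSubst ((t.find? (fun d => d != 0 && d != 1)).getD 0) 0 t) ≤ pvV t := this
        _ = pvV (pvSubst i 1 t) := by rw [← hi1, pvSubst_self]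
      · exact pvMin2Lem ht i j (fun hh => hi1 hh.symm) hj0 hj9
  · rw [if_pos hone, pvSubst_cons, if_pos rfl]
    rcases lt_or_eq_of_le hc1 with hlt | heq
    · exact le_of_lt (pvV_cons_lt (pvDig_subst ht (by norm_num) (by norm_num)) hts
        (by simp [pvLen_subst]) hlt)
    · -- candidate head is 1; since h ≠ 1 this forces h = i and j = 1
      have hhi : h = i ∧ j = 1 := by
        rw [hhc] at heq; split at heq <;> omega
      obtain ⟨rfl, rfl⟩ := hhi
      rw [← heq]

/-- negative case: B's chosen minimal magnitude is ≤ every nonzero candidate magnitude -/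
theorem pvMinNegLem {h : Int} {t : List Int} (hdig : pvDig (h :: t)) (hh1 : 1 ≤ h)
    (i j : Int) (hj0 : 0 ≤ j) (hj9 : j < 10)
    (hne : pvV (pvSubst i j (h :: t)) ≠ 0) :
    pvV (if (h :: t).all (fun d => d == h || d == 0) then pvSubst h 1 (h :: t)
         else pvSubst h 0 (h :: t))
      ≤ pvV (pvSubst i j (h :: t)) := by
  have ht : pvDig t := fun x hx => hdig x (by simp [hx])
  have hts : pvDig (pvSubst i j t) := pvDig_subst ht hj0 hj9
  have hh9 : h < 10 := (hdig h (by simp)).2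
  by_cases hall : (h :: t).all (fun d => d == h || d == 0)
  · rw [if_pos hall]
    have hall' : ∀ d ∈ h :: t, d = h ∨ d = 0 := by
      intro d hd
      have := List.all_eq_true.mp hall d hd
      simpa using this
    by_cases hih : i = h
    · subst hih
      have hj1 : 1 ≤ j := by
        rcases lt_or_eq_of_le hj0 with hlt | heq
        · omega
        · exfalso
          apply hne
          apply pvV_eq_zero_of_all
          intro d hd
          simp only [pvSubst, List.mem_map] at hd
          obtain ⟨e, he, rfl⟩ := hd
          rcases hall' e he with rfl | rfl
          · rw [if_pos rfl]; omega
          · split <;> omega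
      unfold pvSubst
      apply pvV_map_mono
      intro d hd
      rcases hall' d hd with rfl | rfl
      · rw [if_pos rfl, if_pos rfl]; omega
      · split <;> omega
    · unfold pvSubst
      apply pvV_map_mono
      intro d hd
      rcases hall' d hd with rfl | rfl
      · rw [if_pos rfl, if_neg (fun hh => hih hh.symm)]; omega
      · split <;> split <;> omega
  · rw [if_neg hall]
    by_cases hij : i = h ∧ j = 0
    · obtain ⟨rfl, rfl⟩ := hij
      exact le_refl _
    · have hc1 : 1 ≤ (if h = i then j else h) := by
        by_cases hhi : h = i
        · rw [if_pos hhi]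
          rcases lt_or_eq_of_le hj0 with hlt | heq
          · omega
          · exfalso; exact hij ⟨hhi.symm, heq.symm⟩
        · rw [if_neg hhi]; omega
      rw [pvSubst_cons h 0, if_pos rfl, pvSubst_cons i j]
      refine le_of_lt ?_
      calc pvV (0 :: pvSubst h 0 t)
          < 10 ^ t.length := by
            rw [pvV_cons]
            have := pvV_lt (pvDig_subst ht (le_refl 0) (by norm_num) (i := h))
            rw [pvLen_subst] at this
            omega
        _ ≤ pvV ((if h = i then j else h) :: pvSubst i j t) := by
            rw [pvV_cons]
            have h1 := pvV_nonneg hts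
            have h2 : (0:Int) < 10 ^ (pvSubst i j t).length := by positivity
            rw [pvLen_subst] at *
            nlinarith

-- ===== res characterization =====

theorem pvFoldlSkip {α β : Type} (p : α → Prop) [DecidablePred p] (f : α → β) (l : List α)
    (acc : List β) :
    l.foldl (fun acc x => if p x then acc else acc ++ [f x]) acc
      = acc ++ (l.filter (fun x => decide ¬ p x)).map f := by
  induction l generalizing acc with
  | nil => simp
  | cons x l ih =>
    simp only [List.foldl_cons, List.filter_cons]
    by_cases hx : p x
    · rw [if_pos hx, ih]
      simp [hx]
    · rw [if_neg hx, ih]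
      simp [hx]

theorem pvLoop_eq (s : String) :
    pvLoop s = (PySem.List.pyRange 0 10 1).flatMap (fun i =>
      (((PySem.List.pyRange 0 10 1).filter (fun j =>
        decide ¬(PySem.Str.pyGet? (PySem.Str.replace s (PySem.Int.toStr i) (PySem.Int.toStr j)) 0 = some '0'
          ∨ pvStrInt (PySem.Str.replace s (PySem.Int.toStr i) (PySem.Int.toStr j)) = 0))).map
        (fun j => pvStrInt (PySem.Str.replace s (PySem.Int.toStr i) (PySem.Int.toStr j))))) := by
  unfold pvLoop
  have hinner : ∀ (i : Int) (res : List Int),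
      (PySem.List.pyRange 0 10 1).foldl (fun res j =>
        let tmp := PySem.Str.replace s (PySem.Int.toStr i) (PySem.Int.toStr j)
        if PySem.Str.pyGet? tmp 0 = some '0' ∨ pvStrInt tmp = 0 then res
        else res ++ [pvStrInt tmp]) res
      = res ++ (((PySem.List.pyRange 0 10 1).filter (fun j =>
          decide ¬(PySem.Str.pyGet? (PySem.Str.replace s (PySem.Int.toStr i) (PySem.Int.toStr j)) 0 = some '0'
            ∨ pvStrInt (PySem.Str.replace s (PySem.Int.toStr i) (PySem.Int.toStr j)) = 0))).map
          (fun j => pvStrInt (PySem.Str.replace s (PySem.Int.toStr i) (PySem.Int.toStr j)))) := by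
    intro i res
    exact pvFoldlSkip _ _ _ res
  calc (PySem.List.pyRange 0 10 1).foldl (fun res i =>
        (PySem.List.pyRange 0 10 1).foldl (fun res j =>
          let tmp := PySem.Str.replace s (PySem.Int.toStr i) (PySem.Int.toStr j)
          if PySem.Str.pyGet? tmp 0 = some '0' ∨ pvStrInt tmp = 0 then res
          else res ++ [pvStrInt tmp]) res) []
      = (PySem.List.pyRange 0 10 1).foldl (fun res i =>
          res ++ (((PySem.List.pyRange 0 10 1).filter (fun j =>
            decide ¬(PySem.Str.pyGet? (PySem.Str.replace s (PySem.Int.toStr i) (PySem.Int.toStr j)) 0 = some '0'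
              ∨ pvStrInt (PySem.Str.replace s (PySem.Int.toStr i) (PySem.Int.toStr j)) = 0))).map
            (fun j => pvStrInt (PySem.Str.replace s (PySem.Int.toStr i) (PySem.Int.toStr j))))) [] := by
        apply PySem.List.foldl_congr_mem
        intro acc x _
        exact hinner x acc
    _ = _ := by
        rw [PySem.List.foldl_append_eq_flatMap]
        simp

theorem pvMem_loop (s : String) (x : Int) :
    x ∈ pvLoop s ↔ ∃ i j : Int, 0 ≤ i ∧ i < 10 ∧ 0 ≤ j ∧ j < 10 ∧
      ¬(PySem.Str.pyGet? (PySem.Str.replace s (PySem.Int.toStr i) (PySem.Int.toStr j)) 0 = some '0'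
        ∨ pvStrInt (PySem.Str.replace s (PySem.Int.toStr i) (PySem.Int.toStr j)) = 0) ∧
      x = pvStrInt (PySem.Str.replace s (PySem.Int.toStr i) (PySem.Int.toStr j)) := by
  rw [pvLoop_eq]
  simp only [List.mem_flatMap, List.mem_map, List.mem_filter, PySem.List.mem_pyRange_one,
    decide_eq_true_eq]
  constructor
  · rintro ⟨i, ⟨hi0, hi9⟩, j, ⟨⟨hj0, hj9⟩, hcond⟩, hx⟩
    exact ⟨i, j, hi0, hi9, hj0, hj9, hcond, hx.symm⟩
  · rintro ⟨i, j, hi0, hi9, hj0, hj9, hcond, hx⟩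
    exact ⟨i, ⟨hi0, hi9⟩, j, ⟨⟨hj0, hj9⟩, hcond⟩, hx.symm⟩

-- ===== per-candidate facts =====

theorem pvStrInt_toList_cons {s : String} {c : Char} {l : List Char}
    (h : s.toList = c :: l) (hc : c ≠ '-') : pvStrInt s = pvDigitsVal (c :: l) := by
  unfold pvStrInt
  rw [h]
  split
  · rename_i heq
    rw [List.cons.injEq] at heq
    exact absurd heq.1 hc
  · rfl

theorem pvStrInt_toList_neg {s : String} {l : List Char} (h : s.toList = '-' :: l) :
    pvStrInt s = - pvDigitsVal l := by
  unfold pvStrInt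
  rw [h]
  rfl

theorem pvSrc9_bounds {ds : List Int} (h : pvDig ds) :
    0 ≤ (ds.find? (fun d => d != 9)).getD 9 ∧ (ds.find? (fun d => d != 9)).getD 9 < 10 := by
  rcases hf : ds.find? (fun d => d != 9) with _ | e
  · simp
  · have := h e (List.mem_of_find?_eq_some hf)
    simpa using this

theorem pvSrc0_bounds {t : List Int} (h : pvDig t) :
    0 ≤ (t.find? (fun d => d != 0 && d != 1)).getD 0 ∧ (t.find? (fun d => d != 0 && d != 1)).getD 0 < 10 := by
  rcases hf : t.find? (fun d => d != 0 && d != 1) with _ | e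
  · simp
  · have := h e (List.mem_of_find?_eq_some hf)
    simpa using this

/-- positive num: the parsed value and the leading-zero test of each candidate string -/
theorem pvCand_pos (num i j : Int) (hnum : 0 < num) (hi0 : 0 ≤ i) (hi9 : i < 10)
    (hj0 : 0 ≤ j) (hj9 : j < 10) {hh : Int} {tt : List Int} (hDL : pvDS num = hh :: tt) :
    pvStrInt (PySem.Str.replace (PySem.Int.toStr num) (PySem.Int.toStr i) (PySem.Int.toStr j))
        = pvV (pvSubst i j (pvDS num)) ∧
    (PySem.Str.pyGet? (PySem.Str.replace (PySem.Int.toStr num) (PySem.Int.toStr i) (PySem.Int.toStr j)) 0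
        = some '0' ↔ (if hh = i then j else hh) = 0) := by
  have hdig : pvDig (pvDS num) := pvDS_dig num
  have hdigs : pvDig (pvSubst i j (pvDS num)) := pvDig_subst hdig hj0 hj9
  have hlist := pvTmp_pos num i j hnum hi0 hi9 hj0 hj9
  rw [hDL, pvSubst_cons, List.map_cons] at hlist
  set hc := if hh = i then j else hh with hhc
  have hcb : 0 ≤ hc ∧ hc < 10 := by
    have := hdig hh (by rw [hDL]; simp)
    rw [hhc]; split <;> omega
  have hcd : hc.toNat < 10 := by omega
  constructor
  · rw [pvStrInt_toList_cons hlist (pvDigitChar_ne_dash hcd)]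
    have : pvDigitsVal (Nat.digitChar hc.toNat :: (pvSubst i j tt).map (fun d => Nat.digitChar d.toNat))
        = pvDigitsVal ((hc :: pvSubst i j tt).map (fun d => Nat.digitChar d.toNat)) := by
      rw [List.map_cons]
    rw [this, pvDigitsVal_map _ (by rw [hDL, pvSubst_cons] at hdigs; exact hdigs)]
    rw [hDL, pvSubst_cons]
  · rw [pvHead_get _ _ _ hlist]
    rw [Option.some.injEq]
    rw [pvDigitChar_eq_zero_iff hcd]
    omega

/-- negative num: the parsed value of each candidate string; its head is '-' -/
theorem pvCand_neg (num i j : Int) (hnum : num < 0) (hi0 : 0 ≤ i) (hi9 : i < 10)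
    (hj0 : 0 ≤ j) (hj9 : j < 10) :
    pvStrInt (PySem.Str.replace (PySem.Int.toStr num) (PySem.Int.toStr i) (PySem.Int.toStr j))
        = -(pvV (pvSubst i j (pvDS num))) ∧
    PySem.Str.pyGet? (PySem.Str.replace (PySem.Int.toStr num) (PySem.Int.toStr i) (PySem.Int.toStr j)) 0
        = some '-' := by
  have hdig : pvDig (pvDS num) := pvDS_dig num
  have hdigs : pvDig (pvSubst i j (pvDS num)) := pvDig_subst hdig hj0 hj9
  have hlist := pvTmp_neg num i j hnum hi0 hi9 hj0 hj9
  constructor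
  · rw [pvStrInt_toList_neg hlist, pvDigitsVal_map _ hdigs]
  · exact pvHead_get _ _ _ hlist

theorem pvSub_eq (ds : List Int) (src dst : Int) : pvSub ds src dst = pvV (pvSubst src dst ds) := by
  unfold pvSub pvV pvSubst
  rw [List.foldl_map]

-- ===== VERDICT (by name: the statement is the Claim_ definition above) =====
theorem maxDiff2_spec : Claim_equal_maxDiff2 := by
  intro num _
  unfold Spec_maxDiff2
  by_cases h0 : num = 0
  · subst h0; decide
  · obtain ⟨hh, tt, hDL, hh1, hh9⟩ := pvDS_cons num h0
    have hdig : pvDig (pvDS num) := pvDS_dig num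
    have htt : pvDig tt := by
      intro d hd
      exact hdig d (by rw [hDL]; simp [hd])
    have hdigc : pvDig (hh :: tt) := by rw [← hDL]; exact hdig
    have hs9 := pvSrc9_bounds hdig
    have hs0 := pvSrc0_bounds htt
    have hHIpos : 0 < pvV (pvSubst (((pvDS num).find? (fun d => d != 9)).getD 9) 9 (pvDS num)) := by
      have hHIhead : 1 ≤ (if hh = ((pvDS num).find? (fun d => d != 9)).getD 9 then 9 else hh) := by
        split <;> omega
      have hdHI : pvDig ((if hh = ((pvDS num).find? (fun d => d != 9)).getD 9 then 9 else hh)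
          :: pvSubst (((pvDS num).find? (fun d => d != 9)).getD 9) 9 tt) := by
        rw [← pvSubst_cons, ← hDL]
        exact pvDig_subst hdig (by norm_num) (by norm_num)
      rw [hDL, pvSubst_cons]
      rw [hDL] at hdHI hHIhead
      exact pvV_pos_of_mem hdHI (List.mem_cons_self) hHIhead
    have habs : (if num < 0 then -num else num) = ((num.natAbs : Nat) : Int) := by
      split <;> omega
    have hds : (pvRevDigits (if num < 0 then -num else num)).reverse = pvDS num := by
      rw [habs, pvRevDigits_eq, pvDS, List.map_reverse]
    have hhead0 : (PySem.List.pyGet? (pvDS num) 0).getD 0 = hh := by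
      rw [hDL, PySem.List.pyGet?_zero_cons, Option.getD_some]
    have htail : (pvDS num).tail = tt := by rw [hDL]; rfl
    rcases lt_trichotomy num 0 with hneg | hz | hpos
    · -- ===== negative num =====
      have hSMne : pvV (if (pvDS num).all (fun d => d == hh || d == 0)
          then pvSubst hh 1 (pvDS num) else pvSubst hh 0 (pvDS num)) ≠ 0 := by
        by_cases hall : (pvDS num).all (fun d => d == hh || d == 0)
        · rw [if_pos hall]
          have hd1 : pvDig (pvSubst hh 1 (pvDS num)) := pvDig_subst hdig (by norm_num) (by norm_num)
          have hmem : (1:Int) ∈ pvSubst hh 1 (pvDS num) := by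
            rw [hDL, pvSubst_cons, if_pos rfl]
            exact List.mem_cons_self
          exact ne_of_gt (pvV_pos_of_mem hd1 hmem (le_refl 1))
        · rw [if_neg hall]
          rw [List.all_eq_true] at hall
          push_neg at hall
          obtain ⟨e, he, hne⟩ := hall
          have he' : e ≠ hh ∧ e ≠ 0 := by
            constructor <;> intro hcon <;> subst hcon <;> simp at hne
          have hmem : e ∈ pvSubst hh 0 (pvDS num) := by
            unfold pvSubst
            rw [List.mem_map]
            exact ⟨e, he, by rw [if_neg he'.1]⟩
          have hd0 : pvDig (pvSubst hh 0 (pvDS num)) := pvDig_subst hdig (by norm_num) (by norm_num)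
          have he1 : 1 ≤ e := by
            have := hdig e he
            omega
          exact ne_of_gt (pvV_pos_of_mem hd0 hmem he1)
      have hmaxmem : -(pvV (if (pvDS num).all (fun d => d == hh || d == 0)
          then pvSubst hh 1 (pvDS num) else pvSubst hh 0 (pvDS num))) ∈ pvLoop (PySem.Int.toStr num) := by
        rw [pvMem_loop]
        by_cases hall : (pvDS num).all (fun d => d == hh || d == 0)
        · refine ⟨hh, 1, by omega, by omega, by norm_num, by norm_num, ?_, ?_⟩
          · obtain ⟨hval, hhead⟩ := pvCand_neg num hh 1 hneg (by omega) (by omega) (by norm_num) (by norm_num)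
            push_neg
            refine ⟨by rw [hhead]; decide, ?_⟩
            rw [hval]
            rw [if_pos hall] at hSMne
            simp only [neg_ne_zero]
            exact hSMne
          · obtain ⟨hval, _⟩ := pvCand_neg num hh 1 hneg (by omega) (by omega) (by norm_num) (by norm_num)
            rw [hval, if_pos hall]
        · refine ⟨hh, 0, by omega, by omega, by norm_num, by norm_num, ?_, ?_⟩
          · obtain ⟨hval, hhead⟩ := pvCand_neg num hh 0 hneg (by omega) (by omega) (by norm_num) (by norm_num)
            push_neg
            refine ⟨by rw [hhead]; decide, ?_⟩
            rw [hval]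
            rw [if_neg hall] at hSMne
            simp only [neg_ne_zero]
            exact hSMne
          · obtain ⟨hval, _⟩ := pvCand_neg num hh 0 hneg (by omega) (by omega) (by norm_num) (by norm_num)
            rw [hval, if_neg hall]
      have hmaxub : ∀ y ∈ pvLoop (PySem.Int.toStr num),
          y ≤ -(pvV (if (pvDS num).all (fun d => d == hh || d == 0)
            then pvSubst hh 1 (pvDS num) else pvSubst hh 0 (pvDS num))) := by
        intro y hy
        rw [pvMem_loop] at hy
        obtain ⟨i, j, hi0, hi9, hj0, hj9, hcond, rfl⟩ := hy
        obtain ⟨hval, hhead⟩ := pvCand_neg num i j hneg hi0 hi9 hj0 hj9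
        push_neg at hcond
        rw [hval]
        rw [hval] at hcond
        have hvne : pvV (pvSubst i j (pvDS num)) ≠ 0 := by
          have := hcond.2
          omega
        rw [hDL] at hvne ⊢
        have hle := pvMinNegLem hdigc hh1 i j hj0 hj9 hvne
        omega
      have hminmem : -(pvV (pvSubst (((pvDS num).find? (fun d => d != 9)).getD 9) 9 (pvDS num)))
          ∈ pvLoop (PySem.Int.toStr num) := by
        rw [pvMem_loop]
        refine ⟨((pvDS num).find? (fun d => d != 9)).getD 9, 9, hs9.1, hs9.2, by norm_num, by norm_num, ?_, ?_⟩
        · obtain ⟨hval, hhead⟩ := pvCand_neg num (((pvDS num).find? (fun d => d != 9)).getD 9) 9 hneg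
            hs9.1 hs9.2 (by norm_num) (by norm_num)
          push_neg
          refine ⟨by rw [hhead]; decide, ?_⟩
          rw [hval]
          simp only [neg_ne_zero]
          exact ne_of_gt hHIpos
        · obtain ⟨hval, _⟩ := pvCand_neg num (((pvDS num).find? (fun d => d != 9)).getD 9) 9 hneg
            hs9.1 hs9.2 (by norm_num) (by norm_num)
          rw [hval]
      have hminlb : ∀ y ∈ pvLoop (PySem.Int.toStr num),
          -(pvV (pvSubst (((pvDS num).find? (fun d => d != 9)).getD 9) 9 (pvDS num))) ≤ y := by
        intro y hy
        rw [pvMem_loop] at hy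
        obtain ⟨i, j, hi0, hi9, hj0, hj9, hcond, rfl⟩ := hy
        obtain ⟨hval, _⟩ := pvCand_neg num i j hneg hi0 hi9 hj0 hj9
        rw [hval]
        have hle := pvMaxLem hdig i j hj0 hj9
        omega
      have hmax := pvMaxEq _ _ hmaxmem hmaxub
      have hmin := pvMinEq _ _ hminmem hminlb
      have hA : maxDiff2 num = -(pvV (if (pvDS num).all (fun d => d == hh || d == 0)
            then pvSubst hh 1 (pvDS num) else pvSubst hh 0 (pvDS num)))
          - (-(pvV (pvSubst (((pvDS num).find? (fun d => d != 9)).getD 9) 9 (pvDS num)))) := by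
        unfold maxDiff2
        simp only [hmax, hmin, Option.getD_some]
      rw [hA]
      unfold maxDiff2_alt
      rw [if_neg h0]
      simp only [hds, hhead0]
      rw [if_neg (by omega : ¬ 0 < num)]
      simp only [pvSub_eq]
      by_cases hall : (pvDS num).all (fun d => d == hh || d == 0)
      · rw [if_pos hall, if_pos hall]
      · rw [if_neg hall, if_neg hall]
    · exact absurd hz h0
    · -- ===== positive num =====
      have hmaxmem : pvV (pvSubst (((pvDS num).find? (fun d => d != 9)).getD 9) 9 (pvDS num))
          ∈ pvLoop (PySem.Int.toStr num) := by
        rw [pvMem_loop]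
        refine ⟨((pvDS num).find? (fun d => d != 9)).getD 9, 9, hs9.1, hs9.2, by norm_num, by norm_num, ?_, ?_⟩
        · obtain ⟨hval, hhead⟩ := pvCand_pos num (((pvDS num).find? (fun d => d != 9)).getD 9) 9 hpos
            hs9.1 hs9.2 (by norm_num) (by norm_num) hDL
          push_neg
          constructor
          · intro hc
            have hc0 := hhead.mp hc
            split at hc0 <;> omega
          · rw [hval]
            exact ne_of_gt hHIpos
        · obtain ⟨hval, _⟩ := pvCand_pos num (((pvDS num).find? (fun d => d != 9)).getD 9) 9 hpos
            hs9.1 hs9.2 (by norm_num) (by norm_num) hDL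
          rw [hval]
      have hmaxub : ∀ y ∈ pvLoop (PySem.Int.toStr num),
          y ≤ pvV (pvSubst (((pvDS num).find? (fun d => d != 9)).getD 9) 9 (pvDS num)) := by
        intro y hy
        rw [pvMem_loop] at hy
        obtain ⟨i, j, hi0, hi9, hj0, hj9, hcond, rfl⟩ := hy
        obtain ⟨hval, _⟩ := pvCand_pos num i j hpos hi0 hi9 hj0 hj9 hDL
        rw [hval]
        exact pvMaxLem hdig i j hj0 hj9
      have hLOpos : 0 < pvV (if hh ≠ 1 then pvSubst hh 1 (pvDS num)
          else pvSubst ((tt.find? (fun d => d != 0 && d != 1)).getD 0) 0 (pvDS num)) := by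
        by_cases hone : hh = 1
        · rw [if_neg (by simp [hone])]
          have hd1 : pvDig (pvSubst ((tt.find? (fun d => d != 0 && d != 1)).getD 0) 0 (pvDS num)) :=
            pvDig_subst hdig (by norm_num) (by norm_num)
          have hmem : hh ∈ pvSubst ((tt.find? (fun d => d != 0 && d != 1)).getD 0) 0 (pvDS num) := by
            rw [hDL, pvSubst_cons, if_neg (by rw [hone]; exact fun hc => pvSrc0_ne_one tt hc.symm)]
            exact List.mem_cons_self
          exact pvV_pos_of_mem hd1 hmem hh1
        · rw [if_pos hone]
          have hd1 : pvDig (pvSubst hh 1 (pvDS num)) := pvDig_subst hdig (by norm_num) (by norm_num)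
          have hmem : (1:Int) ∈ pvSubst hh 1 (pvDS num) := by
            rw [hDL, pvSubst_cons, if_pos rfl]
            exact List.mem_cons_self
          exact pvV_pos_of_mem hd1 hmem (le_refl 1)
      have hLOmem : pvV (if hh ≠ 1 then pvSubst hh 1 (pvDS num)
          else pvSubst ((tt.find? (fun d => d != 0 && d != 1)).getD 0) 0 (pvDS num))
          ∈ pvLoop (PySem.Int.toStr num) := by
        rw [pvMem_loop]
        by_cases hone : hh = 1
        · refine ⟨(tt.find? (fun d => d != 0 && d != 1)).getD 0, 0, hs0.1, hs0.2, by norm_num, by norm_num, ?_, ?_⟩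
          · obtain ⟨hval, hhead⟩ := pvCand_pos num ((tt.find? (fun d => d != 0 && d != 1)).getD 0) 0 hpos
              hs0.1 hs0.2 (by norm_num) (by norm_num) hDL
            push_neg
            constructor
            · intro hc
              have hc0 := hhead.mp hc
              rw [if_neg (by rw [hone]; exact fun hc2 => pvSrc0_ne_one tt hc2.symm)] at hc0
              omega
            · rw [hval]
              rw [if_neg (by simp [hone])] at hLOpos
              exact ne_of_gt hLOpos
          · obtain ⟨hval, _⟩ := pvCand_pos num ((tt.find? (fun d => d != 0 && d != 1)).getD 0) 0 hpos
              hs0.1 hs0.2 (by norm_num) (by norm_num) hDL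
            rw [hval, if_neg (by simp [hone])]
        · refine ⟨hh, 1, by omega, by omega, by norm_num, by norm_num, ?_, ?_⟩
          · obtain ⟨hval, hhead⟩ := pvCand_pos num hh 1 hpos (by omega) (by omega) (by norm_num) (by norm_num) hDL
            push_neg
            constructor
            · intro hc
              have hc0 := hhead.mp hc
              rw [if_pos rfl] at hc0
              omega
            · rw [hval]
              rw [if_pos hone] at hLOpos
              exact ne_of_gt hLOpos
          · obtain ⟨hval, _⟩ := pvCand_pos num hh 1 hpos (by omega) (by omega) (by norm_num) (by norm_num) hDL
            rw [hval, if_pos hone]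
      have hLOlb : ∀ y ∈ pvLoop (PySem.Int.toStr num),
          pvV (if hh ≠ 1 then pvSubst hh 1 (pvDS num)
            else pvSubst ((tt.find? (fun d => d != 0 && d != 1)).getD 0) 0 (pvDS num)) ≤ y := by
        intro y hy
        rw [pvMem_loop] at hy
        obtain ⟨i, j, hi0, hi9, hj0, hj9, hcond, rfl⟩ := hy
        obtain ⟨hval, hhead⟩ := pvCand_pos num i j hpos hi0 hi9 hj0 hj9 hDL
        push_neg at hcond
        have hch : (if hh = i then j else hh) ≠ 0 := fun hc => hcond.1 (hhead.mpr hc)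
        rw [hval, hDL]
        exact pvMinPosLem hdigc hh1 i j hj0 hj9 hch
      have hmax := pvMaxEq _ _ hmaxmem hmaxub
      have hmin := pvMinEq _ _ hLOmem hLOlb
      have hA : maxDiff2 num = pvV (pvSubst (((pvDS num).find? (fun d => d != 9)).getD 9) 9 (pvDS num))
          - pvV (if hh ≠ 1 then pvSubst hh 1 (pvDS num)
            else pvSubst ((tt.find? (fun d => d != 0 && d != 1)).getD 0) 0 (pvDS num)) := by
        unfold maxDiff2
        simp only [hmax, hmin, Option.getD_some]
      rw [hA]
      unfold maxDiff2_alt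
      rw [if_neg h0]
      simp only [hds, hhead0]
      rw [if_pos hpos]
      simp only [pvSub_eq, PySem.List.slice_from_one, htail]
      by_cases hone : hh = 1
      · rw [if_neg (by simp [hone]), if_neg (by simp [hone])]
      · rw [if_pos hone, if_pos hone]
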